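-- pv_equiv track=rewrite | github.com/Ravencer/aggAlgorithm | matrix.py | matrixR
-- ===== SOURCE A (Python) =====
-- def matrixR(matrix_q, element_names):
--     num_elements = len(element_names)
--     matrix_r = [[0] * (num_elements + 1) for _ in range(num_elements + 1)]
--
--     for j in range(len(element_names)):
--         matrix_r[0][j + 1] = element_names[j]
--
--     for i in range(len(element_names)):
--         matrix_r[i + 1][0] = element_names[i]
--
--     for i in range(1, len(matrix_r)):
--         for j in range(1, len(matrix_r[0])):
--             if i == j:
--                 matrix_r[i][j] = -1
--             else:
--                 matrix_r[i][j] = sum(1 for q1, q2 in zip(matrix_q[i][1:], matrix_q[j][1:]) if q1 == 1 and q2 == 1)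
--
--     return matrix_r
-- ===== SOURCE B (Python) =====
-- def matrixR(matrix_q, element_names):
--     n = len(element_names)
--     ones = [{k for k, v in enumerate(row[1:]) if v == 1} for row in matrix_q[1:n + 1]]
--     header = [0] + list(element_names)
--     return [header] + [
--         [element_names[i]] + [-1 if i == j else len(ones[i] & ones[j]) for j in range(n)]
--         for i in range(n)
--     ]
-- ===== Notes on version B (the rewrite author's own statement) =====
-- stated objective: alternative
-- what changed: Instead of allocating a zero matrix and mutating it with a per-pair zip scan, B precomputes for each data row the set of column indices holding 1 and fills each off-diagonal cell with the size of the intersection of the two index sets, building the rows directly.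
import Mathlib
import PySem

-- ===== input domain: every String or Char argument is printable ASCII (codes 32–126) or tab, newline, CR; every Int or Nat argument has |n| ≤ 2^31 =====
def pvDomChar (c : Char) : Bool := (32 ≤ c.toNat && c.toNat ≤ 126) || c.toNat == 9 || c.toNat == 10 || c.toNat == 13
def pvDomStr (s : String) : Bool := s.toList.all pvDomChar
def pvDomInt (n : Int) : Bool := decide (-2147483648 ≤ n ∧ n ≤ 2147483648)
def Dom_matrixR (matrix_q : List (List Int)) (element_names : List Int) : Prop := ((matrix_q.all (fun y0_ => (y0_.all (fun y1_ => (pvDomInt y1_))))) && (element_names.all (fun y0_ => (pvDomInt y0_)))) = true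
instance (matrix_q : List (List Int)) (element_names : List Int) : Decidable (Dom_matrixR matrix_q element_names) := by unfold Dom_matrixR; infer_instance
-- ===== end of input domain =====

-- B precomputes, per data row, the set of 1-positions of the row's tail, and fills each
-- off-diagonal cell with the size of the intersection of two such sets (objective: alternative).

-- ===== PORT A =====
def matrixR (matrix_q : List (List Int)) (element_names : List Int) : List (List Int) :=
  let numElements : Int := (element_names.length : Int)
  -- [[0] * (num_elements + 1) for _ in range(num_elements + 1)]
  let matrix0 : List (List Int) :=
    List.replicate (numElements.toNat + 1) (List.replicate (numElements.toNat + 1) 0)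
  -- for j in range(len(element_names)): matrix_r[0][j + 1] = element_names[j]
  let m1 := (PySem.List.pyRange 0 numElements 1).foldl
    (fun m j => PySem.List.pySetD m 0
      (PySem.List.pySetD (PySem.List.pyGetD m 0 []) (j + 1)
        (PySem.List.pyGetD element_names j 0))) matrix0
  -- for i in range(len(element_names)): matrix_r[i + 1][0] = element_names[i]
  let m2 := (PySem.List.pyRange 0 numElements 1).foldl
    (fun m i => PySem.List.pySetD m (i + 1)
      (PySem.List.pySetD (PySem.List.pyGetD m (i + 1) []) 0
        (PySem.List.pyGetD element_names i 0))) m1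
  -- the nested fill loop; sum(1 for q1, q2 in zip(...) if q1 == 1 and q2 == 1)
  (PySem.List.pyRange 1 (m2.length : Int) 1).foldl
    (fun m i =>
      (PySem.List.pyRange 1 ((PySem.List.pyGetD m 0 []).length : Int) 1).foldl
        (fun m j => PySem.List.pySetD m i
          (PySem.List.pySetD (PySem.List.pyGetD m i []) j
            (if i = j then -1
             else (((PySem.List.slice (PySem.List.pyGetD matrix_q i []) (some 1) none).zip
                      (PySem.List.slice (PySem.List.pyGetD matrix_q j []) (some 1) none)).map
                    (fun p => if p.1 = 1 ∧ p.2 = 1 then (1 : Int) else 0)).sum))) m) m2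

-- ===== PORT B =====
def matrixR_alt (matrix_q : List (List Int)) (element_names : List Int) : List (List Int) :=
  let n : Int := (element_names.length : Int)
  -- ones = [{k for k, v in enumerate(row[1:]) if v == 1} for row in matrix_q[1:n+1]]
  let ones : List (PySem.Set Int) :=
    (PySem.List.slice matrix_q (some 1) (some (n + 1))).map
      (fun row => PySem.Set.ofList
        (((PySem.List.enumerate (PySem.List.slice row (some 1) none)).filter
            (fun p => p.2 == 1)).map Prod.fst))
  let header : List Int := 0 :: element_names
  header :: (PySem.List.pyRange 0 n 1).map (fun i =>
    PySem.List.pyGetD element_names i 0 ::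
      (PySem.List.pyRange 0 n 1).map (fun j =>
        if i = j then -1
        else PySem.Set.len
          (PySem.Set.inter (PySem.List.pyGetD ones i []) (PySem.List.pyGetD ones j []))))

-- ===== PRECONDITION & SPEC =====
-- Pre_ excludes exactly the inputs where Python A raises IndexError: with at least two
-- element names, the fill loop reads matrix_q[i] for i = 1..n, which needs len(matrix_q) > n.
def Pre_matrixR (matrix_q : List (List Int)) (element_names : List Int) : Prop :=
  element_names.length ≤ 1 ∨ element_names.length < matrix_q.length
instance (matrix_q : List (List Int)) (element_names : List Int) : Decidable (Pre_matrixR matrix_q element_names) := by unfold Pre_matrixR; infer_instance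

def pvWitness_matrixR : List (List Int) × List Int :=
  ([[0, 1, 1], [0, 1, 0], [0, 1, 1]], [7, 8])

def Spec_matrixR (matrix_q : List (List Int)) (element_names : List Int) (out : List (List Int)) : Prop := out = matrixR_alt matrix_q element_names
instance (matrix_q : List (List Int)) (element_names : List Int) (out : List (List Int)) : Decidable (Spec_matrixR matrix_q element_names out) := by unfold Spec_matrixR; infer_instance

-- ===== CLAIM (what is proved, stated in full; the proofs are below) =====
def Claim_equal_matrixR : Prop := ∀ (matrix_q : List (List Int)) (element_names : List Int), Dom_matrixR matrix_q element_names → Pre_matrixR matrix_q element_names → Spec_matrixR matrix_q element_names (matrixR matrix_q element_names)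

-- ===== LEMMAS AND PROOFS =====

-- the common normal form of both ports
def cellCnt (matrix_q : List (List Int)) (i j : Nat) : Int :=
  ((((matrix_q.getD i []).tail).zip ((matrix_q.getD j []).tail)).map
    (fun p => if p.1 = 1 ∧ p.2 = 1 then (1 : Int) else 0)).sum

def canonical (matrix_q : List (List Int)) (element_names : List Int) : List (List Int) :=
  ((0 : Int) :: element_names) ::
    (List.range element_names.length).map (fun i =>
      element_names.getD i 0 ::
        (List.range element_names.length).map (fun j =>
          if i = j then (-1 : Int) else cellCnt matrix_q (i + 1) (j + 1)))

-- generic fold/update lemmas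

theorem foldl_congr_P {α β : Type} (P : α → Prop) (f g : α → β → α) (l : List β)
    (hfg : ∀ m x, P m → x ∈ l → f m x = g m x) (hP : ∀ m x, P m → x ∈ l → P (g m x)) :
    ∀ m, P m → l.foldl f m = l.foldl g m := by
  induction l with
  | nil => intro m _; rfl
  | cons a l ih =>
    intro m hm
    simp only [List.foldl_cons]
    rw [hfg m a hm (List.mem_cons_self ..)]
    exact ih (fun m x h hx => hfg m x h (List.mem_cons_of_mem _ hx))
      (fun m x h hx => hP m x h (List.mem_cons_of_mem _ hx)) _ (hP m a hm (List.mem_cons_self ..))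

theorem foldl_set_row {α : Type} (l : List Int) (i : Int) (u : List α → Int → List α) (d : List α) (hi : 0 ≤ i) :
    ∀ (m : List (List α)), i < (m.length : Int) →
      l.foldl (fun m j => PySem.List.pySetD m i (u (PySem.List.pyGetD m i d) j)) m
        = PySem.List.pySetD m i (l.foldl u (PySem.List.pyGetD m i d)) := by
  induction l with
  | nil =>
    intro m hm
    simp only [List.foldl_nil]
    rw [PySem.List.pySetD_of_nonneg _ _ hi, PySem.List.pyGetD_of_nonneg _ _ hi,
      List.getD_eq_getElem?_getD, List.getElem?_eq_getElem (by omega : i.toNat < m.length)]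
    simp
  | cons a l ih =>
    intro m hm
    simp only [List.foldl_cons]
    rw [ih _ (by rw [PySem.List.pySetD_of_nonneg _ _ hi]; simpa using hm)]
    rw [PySem.List.pySetD_of_nonneg _ _ hi, PySem.List.pySetD_of_nonneg _ _ hi,
      PySem.List.pySetD_of_nonneg _ _ hi, List.set_set,
      PySem.List.pyGetD_of_nonneg _ _ hi, List.getD_eq_getElem?_getD,
      List.getElem?_set_self (by omega : i.toNat < m.length)]
    rfl

theorem foldl_pySetD_idx {α : Type} (l : List Int) (f : Int → α) (hnd : l.Nodup)
    (hpos : ∀ j ∈ l, 0 ≤ j) :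
    ∀ (m : List α) (k : Nat),
      (l.foldl (fun r j => PySem.List.pySetD r j (f j)) m)[k]? =
        if (k : Int) ∈ l ∧ k < m.length then some (f (k : Int)) else m[k]? := by
  induction l with
  | nil => intro m k; simp
  | cons a l ih =>
    intro m k
    have ha : 0 ≤ a := hpos a (List.mem_cons_self ..)
    have hnd' := (List.nodup_cons.mp hnd).2
    have hna : a ∉ l := (List.nodup_cons.mp hnd).1
    simp only [List.foldl_cons]
    rw [ih hnd' (fun j hj => hpos j (List.mem_cons_of_mem _ hj))]
    rw [PySem.List.pySetD_of_nonneg _ _ ha, List.length_set]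
    by_cases hk : (k : Int) ∈ l
    · have hmem : (k : Int) ∈ a :: l := List.mem_cons_of_mem _ hk
      have hka : (k : Int) ≠ a := fun h => hna (h ▸ hk)
      rw [List.getElem?_set_ne (by omega : a.toNat ≠ k)]
      simp [hk, hmem]
    · simp only [hk, false_and, if_false]
      rw [List.getElem?_set]
      by_cases hka : (k : Int) = a
      · have h1 : a.toNat = k := by omega
        have h2 : (k : Int) ∈ a :: l := by rw [hka]; exact List.mem_cons_self ..
        simp only [h1, if_true, hka]
        by_cases hkl : k < m.length <;> simp [hkl]
      · have h1 : a.toNat ≠ k := by omega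
        have h2 : (k : Int) ∉ a :: l := by
          intro h; rcases List.mem_cons.mp h with h | h; exact hka h; exact hk h
        simp [h1, h2]

theorem foldl_pySetD_rows {α : Type} (l : List Int) (g : Int → α → α) (d : α) (hnd : l.Nodup)
    (hpos : ∀ j ∈ l, 0 ≤ j) :
    ∀ (m : List α) (k : Nat),
      (l.foldl (fun m j => PySem.List.pySetD m j (g j (PySem.List.pyGetD m j d))) m)[k]? =
        if (k : Int) ∈ l ∧ k < m.length
        then some (g (k : Int) (PySem.List.pyGetD m (k : Int) d)) else m[k]? := by
  induction l with
  | nil => intro m k; simp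
  | cons a l ih =>
    intro m k
    have ha : 0 ≤ a := hpos a (List.mem_cons_self ..)
    have hnd' := (List.nodup_cons.mp hnd).2
    have hna : a ∉ l := (List.nodup_cons.mp hnd).1
    simp only [List.foldl_cons]
    rw [ih hnd' (fun j hj => hpos j (List.mem_cons_of_mem _ hj))]
    rw [PySem.List.pySetD_of_nonneg _ _ ha, List.length_set]
    by_cases hk : (k : Int) ∈ l
    · have hmem : (k : Int) ∈ a :: l := List.mem_cons_of_mem _ hk
      have hka : (k : Int) ≠ a := fun h => hna (h ▸ hk)
      have hk0 : 0 ≤ (k : Int) := by positivity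
      have hgd : PySem.List.pyGetD (m.set a.toNat (g a (PySem.List.pyGetD m a d))) (k : Int) d
          = PySem.List.pyGetD m (k : Int) d := by
        rw [PySem.List.pyGetD_of_nonneg _ _ hk0, PySem.List.pyGetD_of_nonneg _ _ hk0,
          List.getD_eq_getElem?_getD, List.getD_eq_getElem?_getD,
          List.getElem?_set_ne (by omega : a.toNat ≠ (k : Int).toNat)]
      rw [List.getElem?_set_ne (by omega : a.toNat ≠ k)]
      simp [hk, hmem, hgd]
    · simp only [hk, false_and, if_false]
      rw [List.getElem?_set]
      by_cases hka : (k : Int) = a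
      · have h1 : a.toNat = k := by omega
        have h2 : (k : Int) ∈ a :: l := by rw [hka]; exact List.mem_cons_self ..
        simp only [h1, if_true, hka]
        by_cases hkl : k < m.length <;> simp [hkl]
      · have h1 : a.toNat ≠ k := by omega
        have h2 : (k : Int) ∉ a :: l := by
          intro h; rcases List.mem_cons.mp h with h | h; exact hka h; exact hk h
        simp [h1, h2]

theorem pyRange_succ_shift (n : Nat) :
    PySem.List.pyRange 1 ((n : Int) + 1) 1 = (PySem.List.pyRange 0 (n : Int) 1).map (· + 1) := by
  simp only [PySem.List.pyRange_one, List.map_map]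
  have h1 : ((n : Int) + 1 - 1).toNat = n := by omega
  have h2 : ((n : Int) - 0).toNat = n := by omega
  rw [h1, h2]
  exact List.map_congr_left (fun k _ => by simp; omega)

-- the fill value A writes at (i, j) (proof-local abbreviation for the port's cell term)
def cellA (matrix_q : List (List Int)) (i j : Int) : Int :=
  if i = j then -1
  else
    (List.map (fun p => if p.1 = 1 ∧ p.2 = 1 then (1 : Int) else 0)
        ((PySem.List.slice (PySem.List.pyGetD matrix_q i []) (some 1)).zip
          (PySem.List.slice (PySem.List.pyGetD matrix_q j []) (some 1)))).sum

theorem cellA_eq (matrix_q : List (List Int)) (i j : Int) :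
    (if i = j then (-1 : Int)
     else
       (List.map (fun p => if p.1 = 1 ∧ p.2 = 1 then (1 : Int) else 0)
           ((PySem.List.slice (PySem.List.pyGetD matrix_q i []) (some 1)).zip
             (PySem.List.slice (PySem.List.pyGetD matrix_q j []) (some 1)))).sum)
      = cellA matrix_q i j := rfl

-- A equals the normal form
set_option maxHeartbeats 2000000 in
theorem A_canon (matrix_q : List (List Int)) (element_names : List Int) :
    matrixR matrix_q element_names = canonical matrix_q element_names := by
  simp only [matrixR, Int.toNat_natCast]
  have hrow0 : List.foldl (fun (r : List Int) (j : Int) =>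
        PySem.List.pySetD r (j + 1) (PySem.List.pyGetD element_names j 0))
      (List.replicate (element_names.length + 1) 0)
      (PySem.List.pyRange 0 (element_names.length : Int))
      = (0 : Int) :: element_names := by
    have hmap : List.foldl (fun (r : List Int) (j : Int) =>
          PySem.List.pySetD r (j + 1) (PySem.List.pyGetD element_names j 0))
        (List.replicate (element_names.length + 1) 0)
        (PySem.List.pyRange 0 (element_names.length : Int))
        = List.foldl (fun (r : List Int) (j : Int) =>
            PySem.List.pySetD r j (PySem.List.pyGetD element_names (j - 1) 0))
          (List.replicate (element_names.length + 1) 0)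
          ((PySem.List.pyRange 0 (element_names.length : Int)).map (· + 1)) := by
      rw [List.foldl_map]; simp
    rw [hmap, ← pyRange_succ_shift]
    apply List.ext_getElem?
    intro k
    rw [foldl_pySetD_idx _ _ (PySem.List.nodup_pyRange_one _ _)
      (fun j hj => by have := PySem.List.mem_pyRange_one.mp hj; omega)]
    simp only [List.length_replicate, PySem.List.mem_pyRange_one]
    by_cases hk0 : k = 0
    · subst hk0; simp
    · by_cases hkn : k < element_names.length + 1
      · rw [if_pos (by constructor; constructor <;> omega; omega)]
        rw [show ((k : Int) - 1) = ((k - 1 : Nat) : Int) by omega, PySem.List.pyGetD_natCast,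
          List.getD_eq_getElem?_getD,
          List.getElem?_eq_getElem (by omega : k - 1 < element_names.length)]
        obtain ⟨k', rfl⟩ : ∃ k', k = k' + 1 := ⟨k - 1, by omega⟩
        simp
      · rw [if_neg (by omega)]
        rw [List.getElem?_replicate, if_neg (by omega)]
        rw [List.getElem?_eq_none_iff.mpr (by simp; omega)]
  have hm1 : List.foldl (fun (m : List (List Int)) (j : Int) =>
        PySem.List.pySetD m 0
          (PySem.List.pySetD (PySem.List.pyGetD m 0 []) (j + 1) (PySem.List.pyGetD element_names j 0)))
      (List.replicate (element_names.length + 1) (List.replicate (element_names.length + 1) 0))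
      (PySem.List.pyRange 0 (element_names.length : Int))
      = ((0 : Int) :: element_names) ::
          List.replicate element_names.length (List.replicate (element_names.length + 1) 0) := by
    rw [foldl_set_row (PySem.List.pyRange 0 (element_names.length : Int) 1) 0
      (fun r j => PySem.List.pySetD r (j + 1) (PySem.List.pyGetD element_names j 0)) []
      le_rfl _ (by simp)]
    rw [PySem.List.pyGetD_of_nonneg _ _ le_rfl, PySem.List.pySetD_of_nonneg _ _ le_rfl]
    rw [List.replicate_succ]
    simp only [List.getD_cons_zero, Int.toNat_zero, List.set_cons_zero]
    rw [hrow0]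
  rw [hm1]
  have hm2 : List.foldl (fun (m : List (List Int)) (i : Int) =>
        PySem.List.pySetD m (i + 1)
          (PySem.List.pySetD (PySem.List.pyGetD m (i + 1) []) 0 (PySem.List.pyGetD element_names i 0)))
      (((0 : Int) :: element_names) ::
        List.replicate element_names.length (List.replicate (element_names.length + 1) 0))
      (PySem.List.pyRange 0 (element_names.length : Int))
      = ((0 : Int) :: element_names) ::
          (List.range element_names.length).map (fun i =>
            element_names.getD i 0 :: List.replicate element_names.length 0) := by
    rw [show List.foldl (fun (m : List (List Int)) (i : Int) =>
          PySem.List.pySetD m (i + 1)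
            (PySem.List.pySetD (PySem.List.pyGetD m (i + 1) []) 0 (PySem.List.pyGetD element_names i 0)))
        (((0 : Int) :: element_names) ::
          List.replicate element_names.length (List.replicate (element_names.length + 1) 0))
        (PySem.List.pyRange 0 (element_names.length : Int))
        = List.foldl (fun (m : List (List Int)) (i : Int) =>
            PySem.List.pySetD m i
              (PySem.List.pySetD (PySem.List.pyGetD m i []) 0 (PySem.List.pyGetD element_names (i - 1) 0)))
          (((0 : Int) :: element_names) ::
            List.replicate element_names.length (List.replicate (element_names.length + 1) 0))
          ((PySem.List.pyRange 0 (element_names.length : Int)).map (· + 1)) by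
      rw [List.foldl_map]; simp]
    rw [← pyRange_succ_shift]
    have hgen := foldl_pySetD_rows (PySem.List.pyRange 1 ((element_names.length : Int) + 1) 1)
      (fun i row => PySem.List.pySetD row 0 (PySem.List.pyGetD element_names (i - 1) 0)) []
      (PySem.List.nodup_pyRange_one _ _)
      (fun j hj => by have := PySem.List.mem_pyRange_one.mp hj; omega)
    beta_reduce at hgen
    apply List.ext_getElem?
    intro k
    rw [hgen]
    simp only [List.length_cons, List.length_replicate, PySem.List.mem_pyRange_one]
    by_cases hk0 : k = 0
    · subst hk0; simp
    · by_cases hkn : k < element_names.length + 1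
      · rw [if_pos (by constructor; constructor <;> omega; omega)]
        obtain ⟨k', rfl⟩ : ∃ k', k = k' + 1 := ⟨k - 1, by omega⟩
        rw [show ((k' + 1 : Nat) : Int) = ((k' : Nat) : Int) + 1 by push_cast; ring]
        rw [show ((k' : Int) + 1 - 1) = (k' : Int) by ring]
        rw [PySem.List.pyGetD_natCast]
        rw [show ((k' : Int) + 1) = ((k' + 1 : Nat) : Int) by push_cast; ring]
        rw [PySem.List.pyGetD_natCast]
        simp only [List.getD_cons_succ]
        rw [List.getD_eq_getElem?_getD, List.getElem?_replicate, if_pos (by omega)]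
        rw [PySem.List.pySetD_of_nonneg _ _ le_rfl]
        simp only [Option.getD_some, Int.toNat_zero, List.replicate_succ, List.set_cons_zero]
        rw [List.getElem?_cons_succ, List.getElem?_map, List.getElem?_range (by omega : k' < element_names.length)]
        rfl
      · rw [if_neg (by omega)]
        rw [List.getElem?_eq_none_iff.mpr (by simp; omega),
          List.getElem?_eq_none_iff.mpr (by simp; omega)]
  rw [hm2]
  simp only [cellA_eq]
  simp only [List.length_cons, List.length_map, List.length_range]
  rw [show ((element_names.length + 1 : Nat) : Int) = (element_names.length : Int) + 1 by
    push_cast; ring]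
  have hcongr := foldl_congr_P
    (fun (m : List (List Int)) => m.length = element_names.length + 1 ∧
      m[0]? = some ((0 : Int) :: element_names))
    (fun (m : List (List Int)) (i : Int) =>
      List.foldl
        (fun m j =>
          PySem.List.pySetD m i
            (PySem.List.pySetD (PySem.List.pyGetD m i []) j (cellA matrix_q i j)))
        m (PySem.List.pyRange 1 ((PySem.List.pyGetD m 0 []).length : Int)))
    (fun (m : List (List Int)) (i : Int) =>
      PySem.List.pySetD m i
        (List.foldl (fun r j => PySem.List.pySetD r j (cellA matrix_q i j))
          (PySem.List.pyGetD m i []) (PySem.List.pyRange 1 ((element_names.length : Int) + 1))))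
    (PySem.List.pyRange 1 ((element_names.length : Int) + 1))
    (by
      intro m i hm hi
      obtain ⟨hlen, h0⟩ := hm
      have hi' := PySem.List.mem_pyRange_one.mp hi
      have h0' : PySem.List.pyGetD m 0 [] = (0 : Int) :: element_names := by
        rw [PySem.List.pyGetD_of_nonneg _ _ le_rfl, List.getD_eq_getElem?_getD]
        simp [h0]
      beta_reduce
      rw [h0', List.length_cons,
        show ((element_names.length + 1 : Nat) : Int) = (element_names.length : Int) + 1 by
          push_cast; ring]
      exact foldl_set_row (PySem.List.pyRange 1 ((element_names.length : Int) + 1)) i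
        (fun r j => PySem.List.pySetD r j (cellA matrix_q i j)) [] (by omega) m (by omega))
    (by
      intro m i hm hi
      obtain ⟨hlen, h0⟩ := hm
      have hi' := PySem.List.mem_pyRange_one.mp hi
      beta_reduce
      refine ⟨by rw [PySem.List.length_pySetD]; exact hlen, ?_⟩
      rw [PySem.List.pySetD_of_nonneg _ _ (by omega)]
      rw [List.getElem?_set_ne (by omega)]
      exact h0)
    (((0 : Int) :: element_names) ::
      List.map (fun i => element_names.getD i 0 :: List.replicate element_names.length 0)
        (List.range element_names.length))
    ⟨by simp, rfl⟩
  rw [hcongr]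
  have hcell : ∀ i j : Nat, cellA matrix_q ((i + 1 : Nat) : Int) ((j + 1 : Nat) : Int)
      = if i = j then (-1 : Int) else cellCnt matrix_q (i + 1) (j + 1) := by
    intro i j
    simp only [cellA, cellCnt, PySem.List.slice_from_one, PySem.List.pyGetD_natCast,
      Nat.cast_inj, add_left_inj]
  have hposR : ∀ j ∈ PySem.List.pyRange 1 ((element_names.length : Int) + 1), 0 ≤ j :=
    fun j hj => by have := PySem.List.mem_pyRange_one.mp hj; omega
  have hrow : ∀ (i : Nat),
      List.foldl (fun r j => PySem.List.pySetD r j (cellA matrix_q ((i + 1 : Nat) : Int) j))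
        (element_names.getD i 0 :: List.replicate element_names.length 0)
        (PySem.List.pyRange 1 ((element_names.length : Int) + 1))
      = element_names.getD i 0 ::
          (List.range element_names.length).map
            (fun j => if i = j then (-1 : Int) else cellCnt matrix_q (i + 1) (j + 1)) := by
    intro i
    apply List.ext_getElem?
    intro k
    rw [foldl_pySetD_idx _ _ (PySem.List.nodup_pyRange_one _ _) hposR]
    simp only [List.length_cons, List.length_replicate, PySem.List.mem_pyRange_one]
    by_cases hk0 : k = 0
    · subst hk0; simp
    · by_cases hkn : k < element_names.length + 1
      · rw [if_pos (by constructor; constructor <;> omega; omega)]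
        obtain ⟨k', rfl⟩ : ∃ k', k = k' + 1 := ⟨k - 1, by omega⟩
        rw [hcell i k']
        rw [List.getElem?_cons_succ, List.getElem?_map,
          List.getElem?_range (by omega : k' < element_names.length)]
        rfl
      · rw [if_neg (by omega)]
        rw [List.getElem?_eq_none_iff.mpr (by simp; omega),
          List.getElem?_eq_none_iff.mpr (by simp; omega)]
  have hgen := foldl_pySetD_rows (PySem.List.pyRange 1 ((element_names.length : Int) + 1))
    (fun i row => List.foldl (fun r j => PySem.List.pySetD r j (cellA matrix_q i j)) row
      (PySem.List.pyRange 1 ((element_names.length : Int) + 1))) []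
    (PySem.List.nodup_pyRange_one _ _) hposR
  beta_reduce at hgen
  apply List.ext_getElem?
  intro k
  rw [hgen]
  unfold canonical
  simp only [List.length_cons, List.length_map, List.length_range, PySem.List.mem_pyRange_one]
  by_cases hk0 : k = 0
  · subst hk0; simp
  · by_cases hkn : k < element_names.length + 1
    · rw [if_pos (by constructor; constructor <;> omega; omega)]
      obtain ⟨k', rfl⟩ : ∃ k', k = k' + 1 := ⟨k - 1, by omega⟩
      have hget : PySem.List.pyGetD
          (((0 : Int) :: element_names) ::
            List.map (fun i => element_names.getD i 0 :: List.replicate element_names.length 0)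
              (List.range element_names.length)) ((k' + 1 : Nat) : Int) []
          = element_names.getD k' 0 :: List.replicate element_names.length 0 := by
        rw [PySem.List.pyGetD_natCast, List.getD_cons_succ, List.getD_eq_getElem?_getD,
          List.getElem?_map, List.getElem?_range (by omega : k' < element_names.length)]
        rfl
      rw [hget, hrow k']
      rw [List.getElem?_cons_succ, List.getElem?_map,
        List.getElem?_range (by omega : k' < element_names.length)]
      rfl
    · rw [if_neg (by omega)]
      rw [List.getElem?_eq_none_iff.mpr (by simp; omega),
        List.getElem?_eq_none_iff.mpr (by simp; omega)]

-- the list of 1-positions B collects per row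
def idxList (a : List Int) (s : Int) : List Int :=
  ((PySem.List.enumerate a s).filter (fun p => p.2 == 1)).map Prod.fst

theorem idxList_nil (s : Int) : idxList [] s = [] := rfl

theorem idxList_cons (x : Int) (a : List Int) (s : Int) :
    idxList (x :: a) s = (if x = 1 then [s] else []) ++ idxList a (s + 1) := by
  simp only [idxList, PySem.List.enumerate_cons, List.filter_cons]
  by_cases hx : x = 1
  · simp [hx]
  · simp [hx]

theorem idxList_lb (a : List Int) (s : Int) : ∀ k ∈ idxList a s, s ≤ k := by
  intro k hk
  simp only [idxList, List.mem_map, List.mem_filter] at hk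
  obtain ⟨p, ⟨hp, _⟩, rfl⟩ := hk
  rw [PySem.List.mem_enumerate_iff] at hp
  obtain ⟨m, hm, rfl⟩ := hp
  simp

theorem idxList_pairwise (a : List Int) (s : Int) : (idxList a s).Pairwise (· < ·) := by
  exact List.pairwise_map.mpr ((PySem.List.pairwise_lt_enumerate a s).filter _)

theorem idxList_nodup (a : List Int) (s : Int) : (idxList a s).Nodup :=
  (idxList_pairwise a s).imp ne_of_lt

theorem inter_len (a b : List Int) (s : Int) :
    PySem.Set.len (PySem.Set.inter (PySem.Set.ofList (idxList a s)) (PySem.Set.ofList (idxList b s)))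
      = ((a.zip b).map (fun p => if p.1 = 1 ∧ p.2 = 1 then (1 : Int) else 0)).sum := by
  induction a generalizing b s with
  | nil => simp [idxList_nil, PySem.Set.inter, PySem.Set.len]
  | cons x a' ih =>
    cases b with
    | nil =>
      rw [PySem.Set.ofList_eq_self_of_nodup _ (idxList_nodup (x :: a') s),
        PySem.Set.ofList_eq_self_of_nodup _ (idxList_nodup [] s), idxList_nil]
      simp [PySem.Set.inter, PySem.Set.len, PySem.Set.contains]
    | cons y b' =>
      rw [PySem.Set.ofList_eq_self_of_nodup _ (idxList_nodup (x :: a') s),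
        PySem.Set.ofList_eq_self_of_nodup _ (idxList_nodup (y :: b') s)]
      have ihs := ih b' (s + 1)
      rw [PySem.Set.ofList_eq_self_of_nodup _ (idxList_nodup a' (s + 1)),
        PySem.Set.ofList_eq_self_of_nodup _ (idxList_nodup b' (s + 1))] at ihs
      simp only [PySem.Set.inter, PySem.Set.len, PySem.Set.contains] at ihs ⊢
      rw [idxList_cons x a' s, idxList_cons y b' s, List.filter_append]
      have hmem : ∀ (k : Int), ((if y = 1 then [s] else []) ++ idxList b' (s + 1)).contains k
          = ((y = 1 ∧ k = s) ∨ k ∈ idxList b' (s + 1) : Bool) := by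
        intro k
        by_cases hy : y = 1 <;> simp [hy, eq_comm]
      have h2 : (idxList a' (s + 1)).filter
            (fun k => ((if y = 1 then [s] else []) ++ idxList b' (s + 1)).contains k)
          = (idxList a' (s + 1)).filter (fun k => (idxList b' (s + 1)).contains k) := by
        apply List.filter_congr
        intro k hk
        have hks := idxList_lb a' (s + 1) k hk
        rw [hmem k]
        have hce : (idxList b' (s + 1)).contains k = decide (k ∈ idxList b' (s + 1)) := by
          simp
        rw [hce, decide_eq_decide]
        constructor
        · rintro (⟨_, rfl⟩ | h); omega; exact h
        · intro h; exact Or.inr h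
      rw [h2]
      have h1 : ((if x = 1 then [s] else []).filter
            (fun k => ((if y = 1 then [s] else []) ++ idxList b' (s + 1)).contains k)).length
          = if x = 1 ∧ y = 1 then 1 else 0 := by
        have hnb : s ∉ idxList b' (s + 1) := fun h => by
          have := idxList_lb b' (s + 1) s h; omega
        by_cases hx : x = 1 <;> by_cases hy : y = 1 <;> simp [hx, hy, hnb]
      rw [List.length_append, h1]
      rw [List.zip_cons_cons, List.map_cons, List.sum_cons, ← ihs]
      push_cast
      by_cases hx : x = 1 <;> by_cases hy : y = 1 <;> simp [hx, hy]

-- B equals the normal form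
theorem B_canon (matrix_q : List (List Int)) (element_names : List Int) :
    matrixR_alt matrix_q element_names = canonical matrix_q element_names := by
  simp only [matrixR_alt]
  have hsl : PySem.List.slice matrix_q (some 1) (some ((element_names.length : Int) + 1))
      = (matrix_q.drop 1).take element_names.length := by
    rw [show ((element_names.length : Int) + 1) = ((element_names.length + 1 : Nat) : Int) by
        push_cast; ring,
      show (1 : Int) = ((1 : Nat) : Int) from rfl, PySem.List.slice_natCast]
    simp
  rw [hsl]
  simp only [PySem.List.slice_from_one]
  have hone : ∀ i : Nat, i < element_names.length →
      PySem.List.pyGetD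
        (((matrix_q.drop 1).take element_names.length).map
          (fun row => PySem.Set.ofList
            (List.map Prod.fst
              (List.filter (fun p => p.2 == 1) (PySem.List.enumerate row.tail))))) (i : Int) []
      = PySem.Set.ofList (idxList ((matrix_q.getD (i + 1) []).tail) 0) := by
    intro i hi
    rw [PySem.List.pyGetD_natCast, List.getD_eq_getElem?_getD, List.getElem?_map,
      List.getElem?_take, if_pos hi, List.getElem?_drop,
      show 1 + i = i + 1 by omega, List.getD_eq_getElem?_getD]
    cases hmq : matrix_q[i + 1]? with
    | none => rfl
    | some row => rfl
  have hcellB : ∀ i j : Nat, i < element_names.length → j < element_names.length →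
      (PySem.Set.inter
        (PySem.List.pyGetD
          (((matrix_q.drop 1).take element_names.length).map
            (fun row => PySem.Set.ofList
              (List.map Prod.fst
                (List.filter (fun p => p.2 == 1) (PySem.List.enumerate row.tail))))) (i : Int) [])
        (PySem.List.pyGetD
          (((matrix_q.drop 1).take element_names.length).map
            (fun row => PySem.Set.ofList
              (List.map Prod.fst
                (List.filter (fun p => p.2 == 1) (PySem.List.enumerate row.tail))))) (j : Int) [])).len
      = cellCnt matrix_q (i + 1) (j + 1) := by
    intro i j hi hj
    rw [hone i hi, hone j hj, inter_len]
    rfl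
  unfold canonical
  rw [PySem.List.pyRange_zero_natCast, List.map_map]
  congr 1
  apply List.map_congr_left
  intro i hi
  rw [List.mem_range] at hi
  simp only [Function.comp_apply]
  rw [PySem.List.pyGetD_natCast]
  congr 1
  rw [List.map_map]
  apply List.map_congr_left
  intro j hj
  rw [List.mem_range] at hj
  simp only [Function.comp_apply]
  by_cases hij : i = j
  · subst hij; simp
  · rw [if_neg (by exact_mod_cast hij), if_neg hij]
    exact hcellB i j hi hj


-- ===== VERDICT (by name: the statement is the Claim_ definition above) =====
theorem matrixR_spec : Claim_equal_matrixR := by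
  intro mq en _ _
  unfold Spec_matrixR
  rw [A_canon, B_canon]
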